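-- pv_equiv track=rewrite | github.com/abdelkarim-choukri/sro | sro/claims/rules.py | _is_numberish_text
-- ===== SOURCE A (Python) =====
-- def _is_numberish_text(txt: str) -> bool:
--     # Accept integer, grouped with commas, optional decimal point.
--     if not txt:
--         return False
--     # Quick path: all digits
--     if txt.isdigit():
--         return True
--     # Commas and/or a single dot, otherwise only digits
--     if not all(c.isdigit() or c in {',', '.'} for c in txt):
--         return False
--     # No more than one dot
--     if txt.count('.') > 1:
--         return False
--     # Dots/commas must be surrounded by digits
--     for i, c in enumerate(txt):
--         if c in {',', '.'}:
--             if i == 0 or i == len(txt) - 1: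
--                 return False
--             if not (txt[i - 1].isdigit() and txt[i + 1].isdigit()):
--                 return False
--     return True
-- ===== SOURCE B (Python) =====
-- def _is_numberish_text(txt: str) -> bool:
--     # Tokenise instead of neighbour-scanning: normalise ',' to '.', split on '.',
--     # and require every segment to be a (nonempty) digit run.
--     if not txt:
--         return False
--     if txt.count('.') > 1:
--         return False
--     return all(seg.isdigit() for seg in txt.replace(',', '.').split('.'))
-- ===== Notes on version B (the rewrite author's own statement) =====
-- stated objective: idiomatic
-- what changed: Replaces A's index-based neighbour scan over enumerate(txt) with a tokenise-then-validate pass: normalise ',' to '.', split on '.', and require every segment to satisfy str.isdigit() (empty segments from boundary or adjacent separators fail automatically).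
import Mathlib
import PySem

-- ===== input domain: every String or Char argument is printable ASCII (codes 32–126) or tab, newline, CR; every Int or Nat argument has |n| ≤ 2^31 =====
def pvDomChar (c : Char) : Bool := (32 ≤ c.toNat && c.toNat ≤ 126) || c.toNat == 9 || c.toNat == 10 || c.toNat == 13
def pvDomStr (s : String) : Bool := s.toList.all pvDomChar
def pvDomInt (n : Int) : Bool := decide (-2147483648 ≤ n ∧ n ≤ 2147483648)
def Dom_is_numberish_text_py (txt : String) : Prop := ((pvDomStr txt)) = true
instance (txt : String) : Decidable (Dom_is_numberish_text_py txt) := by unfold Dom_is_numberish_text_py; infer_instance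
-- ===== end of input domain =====

-- B tokenises (normalise ',' to '.', split on '.', every segment must be a digit run)
-- instead of A's index-based neighbour scan; same values, objective: idiomatic.

-- ===== PORT A =====
def is_numberish_text_py (txt : String) : Bool :=
  if txt.toList.isEmpty then false
  else if PySem.Chars.strIsdigit txt.toList then true
  else if !(txt.toList.all fun c => PySem.Chars.isdigit c || (c == ',' || c == '.')) then false
  else if 1 < PySem.Chars.count txt.toList ['.'] then false
  else (PySem.List.enumerate txt.toList).all fun ic =>
    if ic.2 == ',' || ic.2 == '.' then
      if ic.1 == 0 || ic.1 == (txt.toList.length : Int) - 1 then false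
      else PySem.Chars.isdigit (PySem.List.pyGetD txt.toList (ic.1 - 1) ' ') &&
           PySem.Chars.isdigit (PySem.List.pyGetD txt.toList (ic.1 + 1) ' ')
    else true

-- ===== PORT B =====
def is_numberish_text_py_alt (txt : String) : Bool :=
  if txt.toList.isEmpty then false
  else if 1 < PySem.Chars.count txt.toList ['.'] then false
  else (PySem.Chars.splitOn (PySem.Chars.replace txt.toList [','] ['.']) ['.']).all
         PySem.Chars.strIsdigit

-- ===== PRECONDITION & SPEC =====
def Spec_is_numberish_text_py (txt : String) (out : Bool) : Prop := out = is_numberish_text_py_alt txt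
instance (txt : String) (out : Bool) : Decidable (Spec_is_numberish_text_py txt out) := by unfold Spec_is_numberish_text_py; infer_instance

-- ===== CLAIM (what is proved, stated in full; the proofs are below) =====
def Claim_equal_is_numberish_text_py : Prop := ∀ (txt : String), Dom_is_numberish_text_py txt → Spec_is_numberish_text_py txt (is_numberish_text_py txt)

-- ===== LEMMAS AND PROOFS =====

-- abbreviations for the two separator classes and the ','→'.' normalisation
def pvSep1 (c : Char) : Bool := c == ',' || c == '.'
def pvSep2 (c : Char) : Bool := c == '.'
def pvNorm (c : Char) : Char := if c == ',' then '.' else c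

-- proof-only recursive "digit runs separated by p-chars" checker;
-- need = true means "a nonempty digit-headed run must follow"
def pvRun (p : Char → Bool) : List Char → Bool → Bool
  | [], need => !need
  | c :: r, true => PySem.Chars.isdigit c && pvRun p r false
  | c :: r, false =>
      if PySem.Chars.isdigit c then pvRun p r false else p c && pvRun p r true

lemma pvSep1_not_digit {c : Char} (h : pvSep1 c = true) : PySem.Chars.isdigit c = false := by
  rcases Bool.or_eq_true_iff.1 h with h' | h' <;>
    (rw [show c = _ from beq_iff_eq.1 h']; decide)

lemma pvSep2_not_digit {c : Char} (h : pvSep2 c = true) : PySem.Chars.isdigit c = false := by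
  rw [show c = _ from beq_iff_eq.1 h]; decide

lemma pvNorm_digit (c : Char) : PySem.Chars.isdigit (pvNorm c) = PySem.Chars.isdigit c := by
  unfold pvNorm; split
  · next h => rw [show c = ',' from beq_iff_eq.1 h]; decide
  · rfl

lemma pvNorm_sep (c : Char) : pvSep2 (pvNorm c) = pvSep1 c := by
  unfold pvNorm pvSep1 pvSep2; split
  · next h => rw [show c = ',' from beq_iff_eq.1 h]; decide
  · next h => simp [h]

-- fuel lemma: count.go on a one-char needle is List.count
lemma pvCount_go (c : Char) (cs : List Char) (fuel : Nat) (acc : Nat)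
    (h : cs.length ≤ fuel) :
    PySem.Chars.count.go [c] fuel cs acc = acc + cs.count c := by
  induction cs generalizing fuel acc with
  | nil => cases fuel <;> simp [PySem.Chars.count.go]
  | cons x r ih =>
      cases fuel with
      | zero => simp at h
      | succ f =>
        simp only [List.length_cons, Nat.succ_le_succ_iff] at h
        simp only [PySem.Chars.count.go, List.isPrefixOf, Bool.and_true]
        by_cases hx : c = x
        · subst hx
          simp only [beq_self_eq_true, if_true, show ([c].length) = 1 from rfl,
            List.drop_succ_cons, List.drop_zero]
          rw [ih _ _ h]
          simp
          omega
        · have : (c == x) = false := beq_eq_false_iff_ne.2 hx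
          simp [this, ih _ _ h, Ne.symm hx]

lemma pvCount_single (c : Char) (cs : List Char) :
    PySem.Chars.count cs [c] = cs.count c := by
  simp [PySem.Chars.count, pvCount_go c cs cs.length 0 le_rfl]

-- fuel lemma: replace.go on one-char old/new is List.map
lemma pvReplace_go (cs : List Char) (fuel : Nat) (acc : List Char)
    (h : cs.length ≤ fuel) :
    PySem.Chars.replace.go [','] ['.'] fuel cs acc = acc.reverse ++ cs.map pvNorm := by
  induction cs generalizing fuel acc with
  | nil => cases fuel <;> simp [PySem.Chars.replace.go]
  | cons x r ih =>
      cases fuel with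
      | zero => simp at h
      | succ f =>
        simp only [List.length_cons, Nat.succ_le_succ_iff] at h
        simp only [PySem.Chars.replace.go, List.isPrefixOf, Bool.and_true]
        by_cases hx : x = ','
        · subst hx
          simp [ih _ _ h, pvNorm]
        · have : (',' == x) = false := beq_eq_false_iff_ne.2 (Ne.symm hx)
          simp [this, ih _ _ h, pvNorm, hx]

lemma pvReplace_single (cs : List Char) :
    PySem.Chars.replace cs [','] ['.'] = cs.map pvNorm := by
  simp [PySem.Chars.replace, pvReplace_go cs cs.length [] le_rfl]

-- fuel lemma: splitOn.go on a one-char separator is List.splitOnP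
lemma pvSplit_go (cs : List Char) (fuel : Nat) (cur : List Char) (acc : List (List Char))
    (h : cs.length ≤ fuel) :
    PySem.Chars.splitOn.go ['.'] fuel cs cur acc =
      acc.reverse ++ ((cur.reverse ++ ((List.splitOnP pvSep2 cs).headD [])) ::
        (List.splitOnP pvSep2 cs).tail) := by
  induction cs generalizing fuel cur acc with
  | nil => cases fuel <;> simp [PySem.Chars.splitOn.go, List.splitOnP_nil]
  | cons x r ih =>
      cases fuel with
      | zero => simp at h
      | succ f =>
        simp only [List.length_cons, Nat.succ_le_succ_iff] at h
        simp only [PySem.Chars.splitOn.go, List.isPrefixOf, Bool.and_true]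
        by_cases hx : x = '.'
        · subst hx
          simp only [beq_self_eq_true, if_true, show (['.'].length) = 1 from rfl,
            List.drop_succ_cons, List.drop_zero]
          rw [ih _ _ _ h, List.splitOnP_cons]
          have hsep : pvSep2 '.' = true := by decide
          rw [hsep]
          cases hs : List.splitOnP pvSep2 r with
          | nil => exact absurd hs (List.splitOnP_ne_nil _ _)
          | cons s t => simp
        · have h1 : ('.' == x) = false := beq_eq_false_iff_ne.2 (Ne.symm hx)
          have h2 : pvSep2 x = false := by simp [pvSep2, hx]
          rw [h1]
          simp only [Bool.false_eq_true, if_false]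
          rw [ih _ _ _ h, List.splitOnP_cons, h2]
          cases hs : List.splitOnP pvSep2 r with
          | nil => exact absurd hs (List.splitOnP_ne_nil _ _)
          | cons s t => simp

lemma pvSplit_single (cs : List Char) :
    PySem.Chars.splitOn cs ['.'] =
      (((List.splitOnP pvSep2 cs).headD []) :: (List.splitOnP pvSep2 cs).tail) := by
  rw [PySem.Chars.splitOn]
  simpa using pvSplit_go cs (cs.length + 1) [] [] (by omega)

-- pvRun over the normalised list equals pvRun over the original
lemma pvRun_norm (cs : List Char) (need : Bool) :
    pvRun pvSep2 (cs.map pvNorm) need = pvRun pvSep1 cs need := by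
  induction cs generalizing need with
  | nil => rfl
  | cons c r ih =>
      cases need <;>
        simp only [List.map_cons, pvRun, pvNorm_digit, pvNorm_sep, ih]

-- pvRun (need = true) is exactly B's "all segments are digit runs"
lemma pvRun_split (cs : List Char) :
    (pvRun pvSep2 cs true =
      (((List.splitOnP pvSep2 cs).headD []) :: (List.splitOnP pvSep2 cs).tail).all
        PySem.Chars.strIsdigit) ∧
    (pvRun pvSep2 cs false =
      (((List.splitOnP pvSep2 cs).headD []).all PySem.Chars.isdigit &&
        ((List.splitOnP pvSep2 cs).tail).all PySem.Chars.strIsdigit)) := by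
  induction cs with
  | nil => constructor <;> simp [pvRun, List.splitOnP_nil, PySem.Chars.strIsdigit]
  | cons c r ih =>
      obtain ⟨ih1, ih2⟩ := ih
      by_cases hc : pvSep2 c = true
      · constructor
        · simp [pvRun, pvSep2_not_digit hc, List.splitOnP_cons, hc,
            PySem.Chars.strIsdigit]
        · cases hs : List.splitOnP pvSep2 r with
          | nil => exact absurd hs (List.splitOnP_ne_nil _ _)
          | cons s t =>
            rw [hs] at ih1
            simp [pvRun, pvSep2_not_digit hc, List.splitOnP_cons, hc, hs, ih1]
      · have hcf : pvSep2 c = false := by simpa using hc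
        cases hs : List.splitOnP pvSep2 r with
        | nil => exact absurd hs (List.splitOnP_ne_nil _ _)
        | cons s t =>
          rw [hs] at ih1 ih2
          by_cases hd : PySem.Chars.isdigit c = true
          · constructor
            · simp [pvRun, hd, List.splitOnP_cons, hcf, hs, ih2,
                PySem.Chars.strIsdigit]
            · simp [pvRun, hd, List.splitOnP_cons, hcf, hs, ih2]
          · have hdf : PySem.Chars.isdigit c = false := by simpa using hd
            constructor
            · simp [pvRun, hdf, List.splitOnP_cons, hcf, hs, PySem.Chars.strIsdigit]
            · simp [pvRun, hdf, hcf, List.splitOnP_cons, hs]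

-- the index conditions A's scan expresses
def pvSC (cs : List Char) : Prop :=
  ∀ k, k < cs.length → pvSep1 (cs.getD k ' ') = true →
    k ≠ 0 ∧ k + 1 ≠ cs.length ∧
    PySem.Chars.isdigit (cs.getD (k - 1) ' ') = true ∧
    PySem.Chars.isdigit (cs.getD (k + 1) ' ') = true

def pvSC1 (cs : List Char) : Prop :=
  ∀ k, k < cs.length → pvSep1 (cs.getD k ' ') = true →
    k + 1 ≠ cs.length ∧
    PySem.Chars.isdigit (cs.getD (k + 1) ' ') = true ∧
    (k = 0 ∨ PySem.Chars.isdigit (cs.getD (k - 1) ' ') = true)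

-- the head of a pvSC-good nonempty list is a digit
lemma pvHead_digit {r : List Char} (hne : r ≠ [])
    (hall : ∀ c ∈ r, (PySem.Chars.isdigit c || pvSep1 c) = true) (hsc : pvSC r) :
    PySem.Chars.isdigit (r.getD 0 ' ') = true := by
  cases r with
  | nil => exact absurd rfl hne
  | cons a r' =>
      rcases Bool.or_eq_true_iff.1 (hall a (List.mem_cons_self)) with h | h
      · simpa using h
      · exfalso
        exact (hsc 0 (by simp) (by simpa using h)).1 rfl

-- index-shift lemmas for the scan conditions
lemma pvSC_cons_digit {c : Char} {r : List Char}
    (hd : PySem.Chars.isdigit c = true) : pvSC (c :: r) ↔ pvSC1 r := by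
  constructor
  · intro h k hk hp
    obtain ⟨-, hlen, hleft, hright⟩ :=
      h (k + 1) (by simpa using Nat.succ_lt_succ hk) (by simpa using hp)
    refine ⟨by simp at hlen; omega, by simpa using hright, ?_⟩
    cases k with
    | zero => exact Or.inl rfl
    | succ j => exact Or.inr (by simpa using hleft)
  · intro h k hk hp
    cases k with
    | zero =>
        rw [List.getD_cons_zero] at hp
        rw [pvSep1_not_digit hp] at hd; cases hd
    | succ j =>
        rw [List.getD_cons_succ] at hp
        obtain ⟨hlen, hr, hl⟩ := h j (by simpa using hk) hp
        refine ⟨by omega, by simp; omega, ?_, by simpa using hr⟩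
        rcases hl with h0 | hdig
        · subst h0; simpa using hd
        · cases j with
          | zero => simpa using hd
          | succ i => simpa using hdig

lemma pvSC1_cons_digit {c : Char} {r : List Char}
    (hd : PySem.Chars.isdigit c = true) : pvSC1 (c :: r) ↔ pvSC1 r := by
  constructor
  · intro h k hk hp
    obtain ⟨hlen, hr, hl⟩ :=
      h (k + 1) (by simpa using Nat.succ_lt_succ hk) (by simpa using hp)
    refine ⟨by simp at hlen; omega, by simpa using hr, ?_⟩
    rcases hl with h0 | hdig
    · cases h0
    · cases k with
      | zero => exact Or.inl rfl
      | succ j => exact Or.inr (by simpa using hdig)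
  · intro h k hk hp
    cases k with
    | zero =>
        rw [List.getD_cons_zero] at hp
        rw [pvSep1_not_digit hp] at hd; cases hd
    | succ j =>
        rw [List.getD_cons_succ] at hp
        obtain ⟨hlen, hr, hl⟩ := h j (by simpa using hk) hp
        refine ⟨by simp; omega, by simpa using hr, Or.inr ?_⟩
        cases j with
        | zero => simpa using hd
        | succ i =>
            rcases hl with h0 | hdig
            · cases h0
            · simpa using hdig

lemma pvSC1_cons_sep {c : Char} {r : List Char} (hs : pvSep1 c = true) :
    pvSC1 (c :: r) ↔
      (r ≠ [] ∧ PySem.Chars.isdigit (r.getD 0 ' ') = true ∧ pvSC r) := by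
  constructor
  · intro h
    obtain ⟨hlen, hr, -⟩ := h 0 (by simp) (by simpa using hs)
    have hne : r ≠ [] := by
      intro he; subst he; simp at hlen
    refine ⟨hne, by simpa using hr, ?_⟩
    intro k hk hp
    obtain ⟨hlen', hr', hl'⟩ :=
      h (k + 1) (by simpa using Nat.succ_lt_succ hk) (by simpa using hp)
    rcases hl' with h0 | hdig
    · cases h0
    · simp only [Nat.add_sub_cancel] at hdig
      cases k with
      | zero =>
          rw [List.getD_cons_zero] at hdig
          rw [pvSep1_not_digit hs] at hdig; cases hdig
      | succ j =>
          refine ⟨by omega, by simp at hlen'; omega, by simpa using hdig,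
            by simpa using hr'⟩
  · rintro ⟨hne, h0, hsc⟩ k hk hp
    cases k with
    | zero =>
        refine ⟨?_, by simpa using h0, Or.inl rfl⟩
        simp only [List.length_cons, ne_eq]
        intro he
        exact hne (List.eq_nil_of_length_eq_zero (by omega))
    | succ j =>
        rw [List.getD_cons_succ] at hp
        obtain ⟨-, hlen, hleft, hright⟩ := hsc j (by simpa using hk) hp
        refine ⟨by simp; omega, by simpa using hright, Or.inr ?_⟩
        cases j with
        | zero => exact absurd (hsc 0 (by simpa using hk) hp).1 (by simp)
        | succ i => simpa using hleft

lemma pvSC_cons_sep {c : Char} {r : List Char} (hs : pvSep1 c = true) :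
    ¬ pvSC (c :: r) := by
  intro h
  exact (h 0 (by simp) (by simpa using hs)).1 rfl

-- pvRun charactrised by the index conditions
lemma pvRun_iff (cs : List Char) :
    (pvRun pvSep1 cs true = true ↔
      (cs ≠ [] ∧ (∀ c ∈ cs, (PySem.Chars.isdigit c || pvSep1 c) = true) ∧ pvSC cs)) ∧
    (pvRun pvSep1 cs false = true ↔
      ((∀ c ∈ cs, (PySem.Chars.isdigit c || pvSep1 c) = true) ∧ pvSC1 cs)) := by
  induction cs with
  | nil =>
      constructor
      · simp [pvRun]
      · simp only [pvRun, List.not_mem_nil]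
        constructor
        · intro _
          exact ⟨(by intro c h; cases h), (by intro k hk; simp at hk)⟩
        · intro _; rfl
  | cons c r ih =>
      obtain ⟨ih1, ih2⟩ := ih
      have et : pvRun pvSep1 (c :: r) true =
          (PySem.Chars.isdigit c && pvRun pvSep1 r false) := rfl
      have ef : pvRun pvSep1 (c :: r) false =
          (if PySem.Chars.isdigit c then pvRun pvSep1 r false
           else pvSep1 c && pvRun pvSep1 r true) := rfl
      by_cases hd : PySem.Chars.isdigit c = true
      · have hext : ∀ (hall : ∀ x ∈ r, (PySem.Chars.isdigit x || pvSep1 x) = true),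
            ∀ x ∈ c :: r, (PySem.Chars.isdigit x || pvSep1 x) = true := by
          intro hall x hx
          rcases List.mem_cons.1 hx with h | h
          · subst h; simp [hd]
          · exact hall x h
        constructor
        · rw [et, hd, Bool.true_and, ih2]
          constructor
          · rintro ⟨hall, hsc1⟩
            exact ⟨by simp, hext hall, (pvSC_cons_digit hd).2 hsc1⟩
          · rintro ⟨-, hall, hsc⟩
            exact ⟨fun x hx => hall x (List.mem_cons_of_mem _ hx),
              (pvSC_cons_digit hd).1 hsc⟩
        · rw [ef, hd]
          simp only [if_true, ih2]
          constructor
          · rintro ⟨hall, hsc1⟩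
            exact ⟨hext hall, (pvSC1_cons_digit hd).2 hsc1⟩
          · rintro ⟨hall, hsc1⟩
            exact ⟨fun x hx => hall x (List.mem_cons_of_mem _ hx),
              (pvSC1_cons_digit hd).1 hsc1⟩
      · have hdf : PySem.Chars.isdigit c = false := by simpa using hd
        by_cases hs : pvSep1 c = true
        · have hext : ∀ (hall : ∀ x ∈ r, (PySem.Chars.isdigit x || pvSep1 x) = true),
              ∀ x ∈ c :: r, (PySem.Chars.isdigit x || pvSep1 x) = true := by
            intro hall x hx
            rcases List.mem_cons.1 hx with h | h
            · subst h; simp [hs]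
            · exact hall x h
          constructor
          · rw [et, hdf]
            simp only [Bool.false_and, Bool.false_eq_true, false_iff]
            rintro ⟨-, -, hsc⟩
            exact pvSC_cons_sep hs hsc
          · rw [ef, hdf]
            simp only [Bool.false_eq_true, if_false, hs, Bool.true_and, ih1]
            constructor
            · rintro ⟨hne, hall, hsc⟩
              exact ⟨hext hall,
                (pvSC1_cons_sep hs).2 ⟨hne, pvHead_digit hne hall hsc, hsc⟩⟩
            · rintro ⟨hall, hsc1⟩
              obtain ⟨hne, -, hsc⟩ := (pvSC1_cons_sep hs).1 hsc1
              exact ⟨hne, fun x hx => hall x (List.mem_cons_of_mem _ hx), hsc⟩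
        · have hsf : pvSep1 c = false := by simpa using hs
          have hbad : (PySem.Chars.isdigit c || pvSep1 c) = false := by
            simp [hdf, hsf]
          constructor
          · rw [et, hdf]
            simp only [Bool.false_and, Bool.false_eq_true, false_iff]
            rintro ⟨-, hall, -⟩
            rw [hall c List.mem_cons_self] at hbad; cases hbad
          · rw [ef, hdf]
            simp only [Bool.false_eq_true, if_false, hsf, Bool.false_and, false_iff]
            rintro ⟨hall, -⟩
            rw [hall c List.mem_cons_self] at hbad; cases hbad

-- A's enumerate scan is the proposition pvSC
lemma pvScan_iff (cs : List Char) :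
    ((PySem.List.enumerate cs).all fun ic =>
      if ic.2 == ',' || ic.2 == '.' then
        if ic.1 == 0 || ic.1 == (cs.length : Int) - 1 then false
        else PySem.Chars.isdigit (PySem.List.pyGetD cs (ic.1 - 1) ' ') &&
             PySem.Chars.isdigit (PySem.List.pyGetD cs (ic.1 + 1) ' ')
      else true) = true ↔ pvSC cs := by
  rw [List.all_eq_true]
  have elem : ∀ (k : Nat) (hk : k < cs.length),
      ((fun (ic : Int × Char) =>
        if ic.2 == ',' || ic.2 == '.' then
          if ic.1 == 0 || ic.1 == (cs.length : Int) - 1 then false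
          else PySem.Chars.isdigit (PySem.List.pyGetD cs (ic.1 - 1) ' ') &&
               PySem.Chars.isdigit (PySem.List.pyGetD cs (ic.1 + 1) ' ')
        else true) ((k : Int), cs[k]'hk) = true ↔
      (pvSep1 (cs.getD k ' ') = true →
        k ≠ 0 ∧ k + 1 ≠ cs.length ∧
        PySem.Chars.isdigit (cs.getD (k - 1) ' ') = true ∧
        PySem.Chars.isdigit (cs.getD (k + 1) ' ') = true)) := by
    intro k hk
    have hgd : cs.getD k ' ' = cs[k] := List.getD_eq_getElem cs ' ' hk
    rw [hgd]
    beta_reduce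
    by_cases hsep : pvSep1 cs[k] = true
    · rw [if_pos (show (cs[k] == ',' || cs[k] == '.') = true from hsep)]
      by_cases h0 : k = 0
      · subst h0
        simp only [Nat.cast_zero, beq_self_eq_true, Bool.true_or, if_true]
        constructor
        · intro h; cases h
        · intro h; exact absurd rfl (h hsep).1
      · by_cases hl : k + 1 = cs.length
        · have : ((k : Int) == (cs.length : Int) - 1) = true := by
            rw [beq_iff_eq]; omega
          rw [this, Bool.or_true, if_pos rfl]
          constructor
          · intro h; cases h
          · intro h; exact absurd hl (h hsep).2.1
        · have g0 : ((k : Int) == 0) = false := by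
            rw [beq_eq_false_iff_ne]; exact_mod_cast h0
          have g1 : ((k : Int) == (cs.length : Int) - 1) = false := by
            rw [beq_eq_false_iff_ne]; omega
          rw [g0, g1]
          have e1 : ((k : Int) - 1) = ((k - 1 : Nat) : Int) := by omega
          have e2 : ((k : Int) + 1) = ((k + 1 : Nat) : Int) := by omega
          simp only [Bool.or_self, Bool.false_eq_true, if_false, e1, e2,
            PySem.List.pyGetD_natCast]
          constructor
          · intro h
            exact fun _ => ⟨h0, hl, (Bool.and_eq_true_iff.1 h).1,
              (Bool.and_eq_true_iff.1 h).2⟩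
          · intro h
            obtain ⟨-, -, ha, hb⟩ := h hsep
            rw [ha, hb]; rfl
    · have hsf : (cs[k] == ',' || cs[k] == '.') = false := by
        simpa [pvSep1] using hsep
      rw [hsf]
      simp only [Bool.false_eq_true, if_false]
      constructor
      · intro _ hp; exact absurd hp hsep
      · intro _; trivial
  constructor
  · intro h k hk hp
    have hm := h _ ((PySem.List.mem_enumerate_iff cs 0 ((0 + (k : Int)), cs[k])).2
      ⟨k, hk, rfl⟩)
    rw [zero_add] at hm
    exact (elem k hk).1 hm hp
  · intro h ic hic
    obtain ⟨k, hk, rfl⟩ := (PySem.List.mem_enumerate_iff cs 0 ic).1 hic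
    rw [zero_add]
    exact (elem k hk).2 (fun hp => h k hk hp)

-- ===== VERDICT (by name: the statement is the Claim_ definition above) =====
theorem is_numberish_text_py_spec : Claim_equal_is_numberish_text_py := by
  intro txt _
  unfold Spec_is_numberish_text_py is_numberish_text_py is_numberish_text_py_alt
  rw [pvCount_single, pvReplace_single, pvSplit_single]
  set cs := txt.toList with hcs
  have hB : (((List.splitOnP pvSep2 (cs.map pvNorm)).headD []) ::
      (List.splitOnP pvSep2 (cs.map pvNorm)).tail).all PySem.Chars.strIsdigit
      = pvRun pvSep1 cs true := by
    rw [← (pvRun_split (cs.map pvNorm)).1, pvRun_norm]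
  rw [hB]
  by_cases h0 : cs.isEmpty = true
  · rw [if_pos h0, if_pos h0]
  · have h0f : cs.isEmpty = false := by simpa using h0
    have hne : cs ≠ [] := by
      intro he; rw [he] at h0f; cases h0f
    rw [if_neg h0, if_neg h0]
    by_cases h1 : PySem.Chars.strIsdigit cs = true
    · rw [if_pos h1]
      have hall : ∀ c ∈ cs, PySem.Chars.isdigit c = true := by
        have h := h1
        simp only [PySem.Chars.strIsdigit, Bool.and_eq_true, List.all_eq_true] at h
        exact h.2
      have hcnt : ¬ (1 < cs.count '.') := by
        have : cs.count '.' = 0 := by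
          rw [List.count_eq_zero]
          intro hmem
          exact absurd (hall '.' hmem) (by decide)
        omega
      rw [if_neg hcnt]
      symm
      exact ((pvRun_iff cs).1).2 ⟨hne,
        fun c hc => by rw [hall c hc]; rfl,
        by
          intro k hk hp
          exfalso
          rw [List.getD_eq_getElem cs ' ' hk] at hp
          have hd := hall cs[k] (List.getElem_mem hk)
          rw [pvSep1_not_digit hp] at hd
          cases hd⟩
    · rw [if_neg h1]
      by_cases h2 : (cs.all fun c => PySem.Chars.isdigit c || (c == ',' || c == '.')) = true
      · have h2' : (!(cs.all fun c => PySem.Chars.isdigit c || (c == ',' || c == '.'))) = false := by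
          simp [h2]
        rw [h2', if_neg (by simp)]
        by_cases h3 : 1 < cs.count '.'
        · rw [if_pos h3, if_pos h3]
        · rw [if_neg h3, if_neg h3]
          rw [Bool.eq_iff_iff, pvScan_iff, ((pvRun_iff cs).1)]
          constructor
          · intro hsc
            exact ⟨hne, List.all_eq_true.1 h2, hsc⟩
          · rintro ⟨-, -, hsc⟩
            exact hsc
      · have h2' : (!(cs.all fun c => PySem.Chars.isdigit c || (c == ',' || c == '.'))) = true := by
          simpa using h2
        rw [h2', if_pos rfl]
        have hrun : pvRun pvSep1 cs true = false := by
          cases hr : pvRun pvSep1 cs true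
          · rfl
          · exfalso
            obtain ⟨-, hall, -⟩ := ((pvRun_iff cs).1).1 hr
            exact h2 (List.all_eq_true.2 hall)
        rw [hrun]
        by_cases h3 : 1 < cs.count '.'
        · rw [if_pos h3]
        · rw [if_neg h3]
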